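-- pv_equiv track=rewrite | github.com/udayhacks/leetcode | 2610.py | findMatrix
-- ===== SOURCE A (Python) =====
-- def findMatrix(nums):
--     d = {}
--     m = 1
--     for i in nums :
--         if i in d :
--             d[i] +=1
--             m = max(d[i],m)
--         else:
--             d[i]  = 1
--     ans = []
--
--     for i in range(m) :
--         ans.append([])
--
--
--
--     for i in d :
--         while d[i] > 0:
--
--             ans[d[i]-1].append(i)
--             d[i]-=1
--
--
--     return ans
--
-- nums = [1,3,4,1,2,3,1]
-- ===== SOURCE B (Python) =====
-- def findMatrix(nums):
--     counts = {}
--     for x in nums: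
--         counts[x] = counts.get(x, 0) + 1
--     m = max(counts.values(), default=1)
--     return [[v for v, c in counts.items() if c > j] for j in range(m)]
-- ===== Notes on version B (the rewrite author's own statement) =====
-- stated objective: simpler
-- what changed: Replaces A's value-major fill (an outer loop over keys with an inner while that decrements each count and appends into pre-built rows) by a row-major construction: one frequency pass, then each row is a single comprehension over the count table selecting keys with count > row index.
import Mathlib
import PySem

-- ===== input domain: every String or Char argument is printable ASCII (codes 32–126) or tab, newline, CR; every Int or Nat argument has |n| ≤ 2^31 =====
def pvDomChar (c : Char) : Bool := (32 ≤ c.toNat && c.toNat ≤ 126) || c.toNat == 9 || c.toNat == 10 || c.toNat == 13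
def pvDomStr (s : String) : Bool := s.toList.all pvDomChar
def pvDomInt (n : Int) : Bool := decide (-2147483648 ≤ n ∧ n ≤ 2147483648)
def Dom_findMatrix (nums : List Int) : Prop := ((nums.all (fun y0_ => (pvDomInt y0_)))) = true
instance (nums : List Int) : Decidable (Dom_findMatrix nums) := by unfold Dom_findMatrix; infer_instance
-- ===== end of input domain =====

-- B re-implements A's value-major fill (outer loop over keys, inner while decrementing each count)
-- as a row-major construction: each row j is one scan of the count table keeping keys with count > j.
-- Objective: simpler. Return values agree on every input (A is total).

-- ===== PORT A =====
-- A's counting loop body: state (d, m); `if i in d: d[i] += 1; m = max(d[i], m) else: d[i] = 1`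
def countStep (s : PySem.Dict Int Int × Int) (i : Int) : PySem.Dict Int Int × Int :=
  if s.1.contains i then
    (s.1.insert i (s.1.getD i 0 + 1), max (s.1.getD i 0 + 1) s.2)
  else
    (s.1.insert i 1, s.2)

-- A's inner `while d[i] > 0: ans[d[i]-1].append(i); d[i] -= 1`: the mutation of d is local to
-- key i, so it is ported as recursion on the current value c of d[i]; the index d[i]-1 is ≥ 0
-- under the guard, so `.toNat` is exact.
def fillWhile (ans : List (List Int)) (i : Int) (c : Int) : List (List Int) :=
  if 0 < c then fillWhile (ans.modify (c - 1).toNat (fun row => row ++ [i])) i (c - 1) else ans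
termination_by c.toNat
decreasing_by omega

def findMatrix (nums : List Int) : List (List Int) :=
  let s := nums.foldl countStep (PySem.Dict.empty, 1)
  let ans := (PySem.List.pyRange 0 s.2 1).foldl (fun a _ => a ++ [([] : List Int)]) []
  -- `for i in d: while d[i] > 0: …` — iterate the items in insertion order
  s.1.items.foldl (fun a p => fillWhile a p.1 p.2) ans

-- ===== PORT B =====
def findMatrix_alt (nums : List Int) : List (List Int) :=
  let counts := nums.foldl (fun d x => d.insert x (d.getD x 0 + 1)) PySem.Dict.empty
  let m := match PySem.List.max? counts.values (fun y => y) with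
           | some v => v
           | none => 1
  (PySem.List.pyRange 0 m 1).map (fun j => (counts.items.filter (fun p => decide (p.2 > j))).map (·.1))

-- ===== PRECONDITION & SPEC =====
def Spec_findMatrix (nums : List Int) (out : List (List Int)) : Prop := out = findMatrix_alt nums
instance (nums : List Int) (out : List (List Int)) : Decidable (Spec_findMatrix nums out) := by unfold Spec_findMatrix; infer_instance

-- ===== CLAIM (what is proved, stated in full; the proofs are below) =====
def Claim_equal_findMatrix : Prop := ∀ (nums : List Int), Dom_findMatrix nums → Spec_findMatrix nums (findMatrix nums)

-- ===== LEMMAS AND PROOFS =====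

theorem foldl_max_max (x : Int) : ∀ (l : List Int) (b : Int), l.foldl max (max x b) = max x (l.foldl max b) := by
  intro l
  induction l with
  | nil => intro b; rfl
  | cons c t ih =>
    intro b
    simp only [List.foldl_cons, max_assoc]
    exact ih (max b c)

theorem foldl_max_of_le : ∀ (l : List Int) (b : Int), (∀ y ∈ l, y ≤ b) → l.foldl max b = b := by
  intro l
  induction l with
  | nil => intro b _; rfl
  | cons c t ih =>
    intro b h
    simp only [List.foldl_cons]
    rw [max_eq_left (h c (by simp))]
    exact ih b (fun y hy => h y (by simp [hy]))

theorem countStep_fst : ∀ (nums : List Int) (d : PySem.Dict Int Int) (m : Int),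
    (nums.foldl countStep (d, m)).1 = nums.foldl (fun d x => d.insert x (d.getD x 0 + 1)) d := by
  intro nums
  induction nums with
  | nil => intro d m; rfl
  | cons i rest ih =>
    intro d m
    simp only [List.foldl_cons, countStep]
    by_cases h : d.contains i = true
    · simp [h, ih]
    · simp only [Bool.not_eq_true] at h
      rw [PySem.Dict.getD_of_not_contains d (0 : Int) h]
      simp [h, ih]

theorem getD_mem_values (d : PySem.Dict Int Int) (k : Int) (h : d.contains k = true) :
    d.getD k 0 ∈ d.values := by
  rw [PySem.Dict.contains_eq_isSome_get? d k] at h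
  obtain ⟨v, hv⟩ := Option.isSome_iff_exists.mp h
  rw [PySem.Dict.getD_eq_get?_getD, hv]
  have hm := PySem.Dict.mem_items_of_get?_eq_some d hv
  simpa [PySem.Dict.values] using ⟨k, hm⟩

theorem countStep_snd : ∀ (nums : List Int) (d : PySem.Dict Int Int) (m : Int),
    1 ≤ m → (∀ v ∈ d.values, v ≤ m) → (∀ v ∈ d.values, 1 ≤ v) →
    (nums.foldl countStep (d, m)).2 = ((nums.foldl countStep (d, m)).1).values.foldl max m := by
  intro nums
  induction nums with
  | nil =>
    intro d m h1 h2 _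
    simp only [List.foldl_nil]
    exact (foldl_max_of_le d.values m h2).symm
  | cons i rest ih =>
    intro d m h1 h2 h0
    simp only [List.foldl_cons, countStep]
    by_cases h : d.contains i = true
    · simp only [h, if_true]
      have hc1 : 1 ≤ d.getD i 0 := h0 _ (getD_mem_values d i h)
      have hvals : ∀ v ∈ (d.insert i (d.getD i 0 + 1)).values, v ≤ max (d.getD i 0 + 1) m := by
        intro v hv
        rcases PySem.Dict.mem_values_insert d _ _ _ hv with h' | h'
        · exact h' ▸ le_max_left _ _
        · exact le_trans (h2 v h') (le_max_right _ _)
      have hvals1 : ∀ v ∈ (d.insert i (d.getD i 0 + 1)).values, 1 ≤ v := by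
        intro v hv
        rcases PySem.Dict.mem_values_insert d _ _ _ hv with h' | h'
        · omega
        · exact h0 v h'
      rw [ih _ _ (le_trans h1 (le_max_right _ _)) hvals hvals1]
      set R := (rest.foldl countStep (d.insert i (d.getD i 0 + 1), max (d.getD i 0 + 1) m)).1 with hR
      rw [foldl_max_max]
      have hRd : R.getD i 0 = (d.insert i (d.getD i 0 + 1)).getD i 0 + rest.count i := by
        rw [hR, countStep_fst]
        exact PySem.Dict.getD_foldl_insert_add_one rest (d.insert i (d.getD i 0 + 1)) i
      have hself : (d.insert i (d.getD i 0 + 1)).getD i 0 = d.getD i 0 + 1 :=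
        PySem.Dict.getD_insert_self d i (d.getD i 0 + 1) 0
      have hge : d.getD i 0 + 1 ≤ R.getD i 0 := by
        rw [hRd, hself]
        have : (0:Int) ≤ rest.count i := by positivity
        omega
      have hcont : R.contains i = true := by
        by_contra hnc
        simp only [Bool.not_eq_true] at hnc
        rw [PySem.Dict.getD_of_not_contains R (0 : Int) hnc] at hge
        omega
      have hmem : R.getD i 0 ∈ R.values := getD_mem_values R i hcont
      have hle : d.getD i 0 + 1 ≤ R.values.foldl max m :=
        le_trans hge ((PySem.List.le_foldl_max R.values m).2 _ hmem)
      rw [max_eq_right hle]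
    · simp only [h, if_false, Bool.false_eq_true]
      refine ih _ _ h1 ?_ ?_ <;> intro v hv <;>
        rcases PySem.Dict.mem_values_insert d _ _ _ hv with h' | h'
      · exact h' ▸ h1
      · exact h2 v h'
      · exact h' ▸ le_rfl
      · exact h0 v h'

theorem max?_getD_eq_foldl (l : List Int) (h : ∀ y ∈ l, 1 ≤ y) :
    (match PySem.List.max? l (fun y => y) with | some v => v | none => 1) = l.foldl max 1 := by
  cases l with
  | nil => rfl
  | cons x t =>
    rw [PySem.List.max?_id_cons]
    simp only [List.foldl_cons]
    rw [max_eq_right (h x (by simp))]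

theorem fillWhile_eq : ∀ (cn : Nat) (ans : List (List Int)) (i : Int), cn ≤ ans.length →
    fillWhile ans i (cn : Int) = ans.mapIdx (fun j row => if j < cn then row ++ [i] else row) := by
  intro cn
  induction cn with
  | zero =>
    intro ans i _
    rw [fillWhile, if_neg (by omega)]
    apply List.ext_getElem
    · simp
    · intro j h1 h2
      simp [List.getElem_mapIdx]
  | succ n ih =>
    intro ans i h
    rw [fillWhile, if_pos (by exact_mod_cast Nat.succ_pos n)]
    have h1 : (((n + 1 : Nat) : Int) - 1) = (n : Int) := by push_cast; ring
    rw [h1, Int.toNat_natCast]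
    rw [ih _ i (by rw [List.length_modify]; omega)]
    apply List.ext_getElem
    · simp
    · intro j hj1 hj2
      simp only [List.getElem_mapIdx, List.getElem_modify]
      split_ifs <;> first | rfl | omega

theorem foldl_fillWhile : ∀ (ps : List (Int × Int)) (ans : List (List Int)),
    (∀ p ∈ ps, 0 ≤ p.2 ∧ p.2 ≤ (ans.length : Int)) →
    ps.foldl (fun a p => fillWhile a p.1 p.2) ans
      = ans.mapIdx (fun j row => row ++ (ps.filter (fun p => decide ((j : Int) < p.2))).map (·.1)) := by
  intro ps
  induction ps with
  | nil =>
    intro ans _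
    simp only [List.foldl_nil, List.filter_nil, List.map_nil, List.append_nil]
    apply List.ext_getElem
    · simp
    · intro j h1 h2
      simp [List.getElem_mapIdx]
  | cons p ps ih =>
    intro ans h
    obtain ⟨h01, h02⟩ := h p (by simp)
    obtain ⟨cn, hcn⟩ : ∃ cn : Nat, p.2 = (cn : Int) := ⟨p.2.toNat, (Int.toNat_of_nonneg h01).symm⟩
    simp only [List.foldl_cons]
    rw [hcn, fillWhile_eq cn ans p.1 (by exact_mod_cast hcn ▸ h02)]
    rw [ih _ (by
      intro q hq
      have hb := h q (by simp [hq])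
      simpa [List.length_mapIdx] using hb)]
    apply List.ext_getElem
    · simp
    · intro j hj1 hj2
      simp only [List.getElem_mapIdx, List.filter_cons, hcn]
      by_cases hj : (j : Int) < (cn : Int)
      · have hj' : j < cn := by exact_mod_cast hj
        simp [hj, hj', List.append_assoc]
      · have hj' : ¬ j < cn := by omega
        simp [hj, hj']

theorem build_rows : ∀ (l : List Int) (init : List (List Int)),
    l.foldl (fun a _ => a ++ [([] : List Int)]) init = init ++ List.replicate l.length [] := by
  intro l
  induction l with
  | nil => intro init; simp
  | cons c t ih =>
    intro init
    simp only [List.foldl_cons, List.length_cons, List.replicate_succ, ih]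
    simp

theorem mapIdx_replicate (n : Nat) (g : Nat → List Int) :
    (List.replicate n ([] : List Int)).mapIdx (fun j row => row ++ g j) = (List.range n).map g := by
  apply List.ext_getElem
  · simp
  · intro i h1 h2
    simp [List.getElem_mapIdx]

-- ===== VERDICT (by name: the statement is the Claim_ definition above) =====
theorem findMatrix_spec : Claim_equal_findMatrix := by
  unfold Claim_equal_findMatrix
  intro nums _
  unfold Spec_findMatrix findMatrix findMatrix_alt
  simp only [PySem.Dict.foldl_insert_getD_add_one_eq_counter]
  have hfst : (nums.foldl countStep (PySem.Dict.empty, 1)).1 = PySem.Dict.counter nums := by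
    rw [countStep_fst, PySem.Dict.foldl_insert_getD_add_one_eq_counter]
  have hval1 : ∀ v ∈ (PySem.Dict.counter nums : PySem.Dict Int Int).values, 1 ≤ v := by
    intro v hv
    simp only [PySem.Dict.values, PySem.Dict.items_counter, List.map_map, List.mem_map] at hv
    obtain ⟨k, hk, rfl⟩ := hv
    have hkn : k ∈ nums := (PySem.Set.mem_ofList nums k).mp hk
    have h1 := List.count_pos_iff.mpr hkn
    show (1:Int) ≤ ((List.count k nums : Nat) : Int)
    exact_mod_cast h1
  have hsnd : (nums.foldl countStep (PySem.Dict.empty, 1)).2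
      = (PySem.Dict.counter nums).values.foldl max 1 := by
    rw [countStep_snd nums _ 1 le_rfl (by simp [PySem.Dict.values, PySem.Dict.empty])
      (by simp [PySem.Dict.values, PySem.Dict.empty]), hfst]
  rw [hfst, hsnd]
  set m := ((PySem.Dict.counter nums : PySem.Dict Int Int).values).foldl max (1:Int) with hm
  have hm1 : (1:Int) ≤ m := (PySem.List.le_foldl_max _ 1).1
  have hvle : ∀ v ∈ (PySem.Dict.counter nums : PySem.Dict Int Int).values, v ≤ m :=
    (PySem.List.le_foldl_max _ 1).2
  rw [max?_getD_eq_foldl _ hval1, ← hm]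
  rw [build_rows]
  rw [List.nil_append]
  have hlen : (PySem.List.pyRange 0 m 1).length = m.toNat := by
    rw [PySem.List.length_pyRange_one]; simp
  rw [hlen, foldl_fillWhile _ _ (by
    intro p hp
    have hp2 : p.2 ∈ (PySem.Dict.counter nums : PySem.Dict Int Int).values :=
      List.mem_map_of_mem hp
    refine ⟨?_, ?_⟩
    · have := hval1 _ hp2; omega
    · have := hvle _ hp2
      simp only [List.length_replicate]
      omega)]
  rw [mapIdx_replicate m.toNat
    (fun j => ((PySem.Dict.counter nums).items.filter (fun p => decide ((j:Int) < p.2))).map (·.1))]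
  rw [PySem.List.pyRange_one, List.map_map]
  have hm0 : (m - 0).toNat = m.toNat := by omega
  rw [hm0]
  apply List.map_congr_left
  intro k _
  simp [gt_iff_lt]
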